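-- pv_equiv track=rewrite | github.com/12138joe/CS61A-2020fall-to-supervise-myself- | hw02.py | missing_digits
-- ===== SOURCE A (Python) =====
-- def missing_digits(n):
--     """Given a number a that is in sorted, increasing order,
--     return the number of missing digits in n. A missing digit is
--     a number between the first and last digit of a that is not in n.
--     >>> missing_digits(1248) # 3, 5, 6, 7
--     4
--     >>> missing_digits(1122) # No missing numbers
--     0
--     >>> missing_digits(123456) # No missing numbers
--     0
--     >>> missing_digits(3558) # 4, 6, 7
--     3
--     >>> missing_digits(35578) # 4, 6
--     2
--     >>> missing_digits(12456) # 3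
--     1
--     >>> missing_digits(16789) # 2, 3, 4, 5
--     4
--     >>> missing_digits(19) # 2, 3, 4, 5, 6, 7, 8
--     7
--     >>> missing_digits(4) # No missing numbers between 4 and 4
--     0
--     >>> from construct_check import check
--     >>> # ban while or for loops
--     >>> check(HW_SOURCE_FILE, 'missing_digits', ['While', 'For'])
--     True
--     """
--     "*** YOUR CODE HERE ***"
--     if n < 10:
--         return 0
--     else:
--         last,last_second = n % 10, (n // 10) % 10
--         n = n // 10
--         if last == last_second:
--             return last - last_second + missing_digits(n)
--         else:
--             return last - last_second - 1 + missing_digits(n)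
-- ===== SOURCE B (Python) =====
-- def missing_digits(n):
--     if n < 10:
--         return 0
--     ds = []
--     while n:
--         ds.append(n % 10)
--         n //= 10
--     return sum(a - b - 1 for a, b in zip(ds, ds[1:]) if a != b)
-- ===== Notes on version B (the rewrite author's own statement) =====
-- stated objective: alternative
-- what changed: Replaces A's tail recursion that accumulates a per-step correction while peeling digits arithmetically with an iterative version: materialise the digit list once with a while loop, then sum the gap (a-b-1) over adjacent unequal digit pairs in one comprehension.
import Mathlib
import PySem

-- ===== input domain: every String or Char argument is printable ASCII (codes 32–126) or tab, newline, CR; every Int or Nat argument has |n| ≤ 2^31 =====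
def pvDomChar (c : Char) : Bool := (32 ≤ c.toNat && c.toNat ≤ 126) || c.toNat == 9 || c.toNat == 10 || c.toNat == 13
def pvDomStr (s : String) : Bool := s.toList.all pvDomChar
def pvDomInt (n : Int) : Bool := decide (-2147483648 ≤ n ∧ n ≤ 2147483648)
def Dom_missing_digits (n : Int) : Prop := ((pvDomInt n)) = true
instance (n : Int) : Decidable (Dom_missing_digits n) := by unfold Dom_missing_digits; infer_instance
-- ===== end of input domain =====

-- B replaces A's tail recursion over arithmetic digit peeling with an iterative
-- digit-list build plus one pass over adjacent pairs (objective: alternative).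


-- ===== PORT A =====
-- termination helper for both ports' digit-peeling recursion
theorem pv_fd10_toNat_lt (n : Int) (h : 0 < n) :
    (PySem.Int.floordiv n 10).toNat < n.toNat := by
  have h1 : PySem.Int.floordiv n 10 < n := by
    rw [PySem.Int.floordiv_lt_iff_lt_mul (by norm_num)]
    omega
  have h2 : (0:Int) ≤ PySem.Int.floordiv n 10 := by
    rw [PySem.Int.le_floordiv_iff_mul_le (by norm_num)]
    omega
  omega

def missing_digits (n : Int) : Int :=
  if n < 10 then 0
  else
    let last := PySem.Int.mod n 10
    let last_second := PySem.Int.mod (PySem.Int.floordiv n 10) 10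
    if last = last_second then
      last - last_second + missing_digits (PySem.Int.floordiv n 10)
    else
      last - last_second - 1 + missing_digits (PySem.Int.floordiv n 10)
termination_by n.toNat
decreasing_by all_goals exact pv_fd10_toNat_lt n (by omega)

-- ===== PORT B =====
-- while n: ds.append(n % 10); n //= 10   (the 'n ≤ 0' guard only makes the loop total;
-- it is reached only with n > 0, where it matches Python's 'while n')
def digitsLSB (n : Int) : List Int :=
  if n ≤ 0 then []
  else PySem.Int.mod n 10 :: digitsLSB (PySem.Int.floordiv n 10)
termination_by n.toNat
decreasing_by all_goals exact pv_fd10_toNat_lt n (by omega)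

-- sum(a - b - 1 for a, b in zip(ds, ds[1:]) if a != b)
def pairSum : List Int → Int
  | a :: b :: rest => (if a ≠ b then a - b - 1 else 0) + pairSum (b :: rest)
  | _ => 0

def missing_digits_alt (n : Int) : Int :=
  if n < 10 then 0
  else pairSum (digitsLSB n)

-- ===== PRECONDITION & SPEC =====
def Spec_missing_digits (n : Int) (out : Int) : Prop := out = missing_digits_alt n
instance (n : Int) (out : Int) : Decidable (Spec_missing_digits n out) := by unfold Spec_missing_digits; infer_instance

-- ===== CLAIM (what is proved, stated in full; the proofs are below) =====
def Claim_equal_missing_digits : Prop := ∀ (n : Int), Dom_missing_digits n → Spec_missing_digits n (missing_digits n)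

-- ===== LEMMAS AND PROOFS =====

theorem digitsLSB_pos (n : Int) (h : 0 < n) :
    digitsLSB n = PySem.Int.mod n 10 :: digitsLSB (PySem.Int.floordiv n 10) := by
  rw [digitsLSB]
  simp [show ¬ n ≤ 0 by omega]

theorem missing_digits_eq_pairSum (n : Int) : missing_digits n = pairSum (digitsLSB n) := by
  by_cases h : n < 10
  · rw [missing_digits]
    simp only [h, if_pos]
    by_cases h0 : n ≤ 0
    · rw [digitsLSB]; simp [h0, pairSum]
    · have hz : PySem.Int.floordiv n 10 = 0 := by
        rw [PySem.Int.floordiv_eq_ediv_of_pos (by norm_num)]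
        omega
      rw [digitsLSB_pos n (by omega), hz, digitsLSB]
      simp [pairSum]
  · have hpos : 0 < PySem.Int.floordiv n 10 := by
      rw [show (0:Int) < PySem.Int.floordiv n 10 ↔ 1 ≤ PySem.Int.floordiv n 10 by omega,
          PySem.Int.le_floordiv_iff_mul_le (by norm_num)]
      omega
    have ih := missing_digits_eq_pairSum (PySem.Int.floordiv n 10)
    rw [missing_digits]
    rw [digitsLSB_pos n (by omega), digitsLSB_pos _ hpos, pairSum,
        ← digitsLSB_pos _ hpos, ← ih]
    simp only [h, if_neg, not_false_iff]
    split_ifs with he <;> omega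
termination_by n.toNat
decreasing_by exact pv_fd10_toNat_lt n (by omega)

-- ===== VERDICT (by name: the statement is the Claim_ definition above) =====
theorem missing_digits_spec : Claim_equal_missing_digits := by
  intro n _
  unfold Spec_missing_digits missing_digits_alt
  by_cases h : n < 10
  · rw [missing_digits]; simp [h]
  · rw [if_neg h]; exact missing_digits_eq_pairSum n
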